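-- pv_equiv track=rewrite | github.com/AdityaaSingh74/Competitive_Programming | Contests/BePositive.py | be_positive
-- ===== SOURCE A (Python) =====
-- def no_of_negetive(s):
--     count = 0
--     for i in s:
--         if int(i) < 0:
--             count += 1
--     return count
--
-- def be_positive(s):
--     neg_cnt = no_of_negetive(s)
--     cnt = 0
--     for i in s:
--         if (i<0 and neg_cnt%2!=0):
--             cnt+=2
--             neg_cnt-=1
--         if i==0:
--             cnt+=1
--     return cnt
-- ===== SOURCE B (Python) =====
-- def be_positive(s):
--     # Single pass: toggle a parity flag on each negative (no counter),
--     # tally zeros as we go; add 2 at the end iff the flag ended up set.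
--     odd_negs = False
--     cnt = 0
--     for i in s:
--         if int(i) < 0:
--             odd_negs = not odd_negs
--         if i == 0:
--             cnt += 1
--     return cnt + 2 * odd_negs
-- ===== Notes on version B (the rewrite author's own statement) =====
-- stated objective: simpler
-- what changed: Replaces A's two staged passes (a full negative count, then a loop that decrements that counter and pays +2 at the first negative) with a single pass maintaining only a boolean parity flag toggled per negative and a zero tally, adding 2 at the end iff the flag is set.
import Mathlib
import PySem

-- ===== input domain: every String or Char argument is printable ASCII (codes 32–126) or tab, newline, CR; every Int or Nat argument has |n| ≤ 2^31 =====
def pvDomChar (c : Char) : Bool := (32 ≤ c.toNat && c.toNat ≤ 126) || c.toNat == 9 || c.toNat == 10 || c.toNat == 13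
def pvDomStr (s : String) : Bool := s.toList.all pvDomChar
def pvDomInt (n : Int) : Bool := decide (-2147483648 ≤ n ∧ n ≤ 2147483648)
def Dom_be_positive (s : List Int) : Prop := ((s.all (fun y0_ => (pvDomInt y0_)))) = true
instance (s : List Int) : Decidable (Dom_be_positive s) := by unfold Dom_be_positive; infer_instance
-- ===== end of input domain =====

-- B replaces A's two staged passes (full negative count, then a loop decrementing that
-- counter and paying +2 at the first negative) with a single pass carrying only a boolean
-- parity flag and a zero tally. Objective: simpler.

-- ===== PORT A =====
def no_of_negetive (s : List Int) : Int :=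
  s.foldl (fun count i => if i < 0 then count + 1 else count) 0

def be_positive (s : List Int) : Int :=
  (s.foldl (fun (st : Int × Int) i =>
      let st1 := if i < 0 ∧ st.1 % 2 ≠ 0 then (st.1 - 1, st.2 + 2) else st
      if i = 0 then (st1.1, st1.2 + 1) else st1)
    (no_of_negetive s, 0)).2

-- ===== PORT B =====
def be_positive_alt (s : List Int) : Int :=
  let st := s.foldl (fun (st : Bool × Int) i =>
      let st1 := if i < 0 then (!st.1, st.2) else st
      if i = 0 then (st1.1, st1.2 + 1) else st1)
    (false, 0)
  st.2 + 2 * (if st.1 then 1 else 0)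

-- ===== PRECONDITION & SPEC =====
def Spec_be_positive (s : List Int) (out : Int) : Prop := out = be_positive_alt s
instance (s : List Int) (out : Int) : Decidable (Spec_be_positive s out) := by unfold Spec_be_positive; infer_instance

-- ===== CLAIM (what is proved, stated in full; the proofs are below) =====
def Claim_equal_be_positive : Prop := ∀ (s : List Int), Dom_be_positive s → Spec_be_positive s (be_positive s)

-- ===== LEMMAS AND PROOFS =====

def pvStepA : (Int × Int) → Int → (Int × Int) := fun st i =>
  let st1 := if i < 0 ∧ st.1 % 2 ≠ 0 then (st.1 - 1, st.2 + 2) else st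
  if i = 0 then (st1.1, st1.2 + 1) else st1

def pvStepB : (Bool × Int) → Int → (Bool × Int) := fun st i =>
  let st1 := if i < 0 then (!st.1, st.2) else st
  if i = 0 then (st1.1, st1.2 + 1) else st1

theorem negcount_foldl (s : List Int) (c : Int) :
    s.foldl (fun count i => if i < 0 then count + 1 else count) c
      = c + ((s.filter (fun i => decide (i < 0))).length : Int) := by
  induction s generalizing c with
  | nil => simp
  | cons a t ih =>
    simp only [List.foldl_cons, List.filter_cons]
    by_cases h : a < 0 <;> simp [h, ih] <;> push_cast <;> ring

theorem foldlA_even (s : List Int) (n c : Int) (hn : n % 2 = 0) :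
    (s.foldl pvStepA (n, c)).2 = c + ((s.filter (fun i => decide (i = 0))).length : Int) := by
  induction s generalizing c with
  | nil => simp
  | cons a t ih =>
    simp only [List.foldl_cons, List.filter_cons, pvStepA]
    have h1 : ¬ (a < 0 ∧ n % 2 ≠ 0) := by omega
    rw [if_neg h1]
    by_cases h0 : a = 0
    · rw [if_pos h0]
      simp only [ih, h0]
      simp
      push_cast
      ring
    · rw [if_neg h0]
      simp [ih, h0]

theorem foldlA_odd (s : List Int) (n c : Int) (hn : n % 2 ≠ 0) :
    (s.foldl pvStepA (n, c)).2 = c + ((s.filter (fun i => decide (i = 0))).length : Int)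
      + (if ∃ i ∈ s, i < 0 then 2 else 0) := by
  induction s generalizing c with
  | nil => simp
  | cons a t ih =>
    simp only [List.foldl_cons, List.filter_cons, pvStepA]
    by_cases ha : a < 0
    · have h0 : ¬ a = 0 := by omega
      have hc : a < 0 ∧ n % 2 ≠ 0 := ⟨ha, hn⟩
      rw [if_pos hc, if_neg h0]
      rw [foldlA_even t (n - 1) (c + 2) (by omega)]
      simp only [h0, decide_false, Bool.false_eq_true, if_false, List.mem_cons, exists_eq_or_imp]
      rw [if_pos (Or.inl ha)]
      ring
    · have h1 : ¬ (a < 0 ∧ n % 2 ≠ 0) := fun h => ha h.1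
      rw [if_neg h1]
      by_cases h0 : a = 0
      · rw [if_pos h0, ih]
        simp [ha, h0]
        push_cast
        ring
      · rw [if_neg h0, ih]
        simp [ha, h0]

theorem odd_count_has_neg (s : List Int)
    (h : ((s.filter (fun i => decide (i < 0))).length : Int) % 2 ≠ 0) :
    ∃ i ∈ s, i < 0 := by
  by_contra hn
  push_neg at hn
  have : s.filter (fun i => decide (i < 0)) = [] := by
    apply List.filter_eq_nil_iff.mpr
    intro a ha
    simp [hn a ha]
  simp [this] at h

theorem foldlB_snd (s : List Int) (p : Bool) (c : Int) :
    (s.foldl pvStepB (p, c)).2 = c + ((s.filter (fun i => decide (i = 0))).length : Int) := by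
  induction s generalizing p c with
  | nil => simp
  | cons a t ih =>
    simp only [List.foldl_cons, List.filter_cons, pvStepB]
    by_cases ha : a < 0 <;> by_cases h0 : a = 0 <;>
      simp [ha, h0, ih] <;> push_cast <;> ring

theorem foldlB_fst (s : List Int) (p : Bool) (c : Int) :
    (s.foldl pvStepB (p, c)).1
      = xor p (decide ((s.filter (fun i => decide (i < 0))).length % 2 = 1)) := by
  induction s generalizing p c with
  | nil => simp
  | cons a t ih =>
    simp only [List.foldl_cons, List.filter_cons, pvStepB]
    by_cases ha : a < 0 <;> by_cases h0 : a = 0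
    · omega
    · have hlen : ∀ m : Nat, ((m + 1) % 2 = 1) = (¬ m % 2 = 1) := by
        intro m; simp; omega
      simp [ha, h0, ih, hlen]
      cases p <;> by_cases hp : (t.filter (fun i => decide (i < 0))).length % 2 = 1 <;>
        simp [hp] <;> omega
    · simp [ha, h0, ih]
    · simp [ha, h0, ih]

-- ===== VERDICT (by name: the statement is the Claim_ definition above) =====
theorem be_positive_spec : Claim_equal_be_positive := by
  intro s _
  unfold Spec_be_positive be_positive be_positive_alt
  rw [show (fun (st : Int × Int) i =>
      let st1 := if i < 0 ∧ st.1 % 2 ≠ 0 then (st.1 - 1, st.2 + 2) else st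
      if i = 0 then (st1.1, st1.2 + 1) else st1) = pvStepA from rfl]
  rw [show (fun (st : Bool × Int) i =>
      let st1 := if i < 0 then (!st.1, st.2) else st
      if i = 0 then (st1.1, st1.2 + 1) else st1) = pvStepB from rfl]
  have hneg : no_of_negetive s = ((s.filter (fun i => decide (i < 0))).length : Int) := by
    unfold no_of_negetive
    rw [negcount_foldl]; ring
  simp only [foldlB_fst, foldlB_snd, Bool.false_xor]
  by_cases hpar : ((s.filter (fun i => decide (i < 0))).length : Int) % 2 = 0
  · have hnat : ¬ (s.filter (fun i => decide (i < 0))).length % 2 = 1 := by omega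
    rw [foldlA_even s _ 0 (by rw [hneg]; exact hpar)]
    simp [hnat]
  · have hnat : (s.filter (fun i => decide (i < 0))).length % 2 = 1 := by omega
    rw [foldlA_odd s _ 0 (by rw [hneg]; exact hpar)]
    simp [hnat, odd_count_has_neg s hpar]
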